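-- pv_equiv track=rewrite | github.com/AbhishekKolakkal/sdeInterviewThings | advancedDsaArrays.py | beggarsProblem
-- ===== SOURCE A (Python) =====
-- def beggarsProblem(A, B):
--     '''
--     It is given that there are A beggers sitting in a row which means we have 5 beggars for the input given
--     so you have another 2 d Array given which has 3 values in it
--     0th -> Left range 1th -> Right range 2nd Value -> the amout donated
--     I want to give amounts like the total amount received by the beggar at the end of the day
--     [0,0,0,0,0]
--     when I took first array it did this
--     [10, 10, 0, 0, 0]
--     when i tool second array it did this
--     [10, 30, 20, 0, 0]
--     when I took 3rd array
--     [10, 55, 45, 25, 25]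
--
--     Approach
--     1. need to have an array with n length of 0's
--     2. i will be having a for loop for B in which will take the value and add the positive value in the start index and negative value in the end index
--         1. here we will need to handle condition for value being there already, if the value is there already then I need to add with the previous value and add the new value
--
--     3. once this is done then I will do a sum
--
--     '''
--     result = [0] * A
--     for i in range(0, len(B)):
--         numberToAdd = B[i][2]
--         result[B[i][0] - 1] = result[B[i][0] - 1] + numberToAdd
--         if B[i][1] < A:
--             result[B[i][1] - 1 + 1] = result[B[i][1] - 1 + 1] + (-numberToAdd)
--
--     # [10, 0, -10, 0, 20]
--
--     i = 0
--     for i in range(1, len(result)):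
--         result[i] = result[i] + result[i - 1]
--
--     return result
-- ===== SOURCE B (Python) =====
-- def beggarsProblem(A, B):
--     # Per-query suffix updates: query (l, r, v) gives v to every beggar from l onward,
--     # and beggars after r give it back; no difference array, no prefix-sum pass.
--     result = [0] * A
--     for q in B:
--         v = q[2]
--         result[q[0] - 1:] = [x + v for x in result[q[0] - 1:]]
--         if q[1] < A:
--             result[q[1]:] = [x - v for x in result[q[1]:]]
--     return result
-- ===== Notes on version B (the rewrite author's own statement) =====
-- stated objective: alternative
-- what changed: Replaces A's difference-array bookkeeping plus in-place prefix-sum pass with direct per-query suffix slice-assignments: each query adds its donation to everyone from the start position onward and subtracts it from everyone past the end position, so no delta array and no prefix pass exist.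
import Mathlib
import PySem

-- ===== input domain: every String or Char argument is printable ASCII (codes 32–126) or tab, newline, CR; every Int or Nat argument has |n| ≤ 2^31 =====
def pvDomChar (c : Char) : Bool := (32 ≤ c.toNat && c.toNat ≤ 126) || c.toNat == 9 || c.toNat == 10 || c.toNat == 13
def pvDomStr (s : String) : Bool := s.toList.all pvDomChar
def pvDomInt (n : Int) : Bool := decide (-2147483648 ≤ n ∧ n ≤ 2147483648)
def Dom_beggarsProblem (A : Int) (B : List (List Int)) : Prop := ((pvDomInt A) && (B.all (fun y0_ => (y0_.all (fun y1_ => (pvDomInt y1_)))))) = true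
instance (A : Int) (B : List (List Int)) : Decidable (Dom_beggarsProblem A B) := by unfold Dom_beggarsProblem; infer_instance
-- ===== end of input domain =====

-- B replaces A's difference-array pass + in-place prefix-sum pass by direct per-range
-- accumulation with an inner loop per query (alternative decomposition, not faster).


-- ===== PORT A =====
-- body of A's first loop (difference-array update for query B[i])
def beggarsProblemStep (A : Int) (res : List Int) (q : List Int) : List Int :=
  let numberToAdd := PySem.List.pyGetD q 2 0
  let res := PySem.List.pySetD res (PySem.List.pyGetD q 0 0 - 1)
      (PySem.List.pyGetD res (PySem.List.pyGetD q 0 0 - 1) 0 + numberToAdd)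
  if PySem.List.pyGetD q 1 0 < A then
    PySem.List.pySetD res (PySem.List.pyGetD q 1 0 - 1 + 1)
      (PySem.List.pyGetD res (PySem.List.pyGetD q 1 0 - 1 + 1) 0 + (-numberToAdd))
  else res

-- A's second loop (in-place prefix sums over `result`)
def beggarsProblemPrefStep (res : List Int) (i : Int) : List Int :=
  PySem.List.pySetD res i (PySem.List.pyGetD res i 0 + PySem.List.pyGetD res (i - 1) 0)

def beggarsProblemPref (result : List Int) : List Int :=
  (PySem.List.pyRange 1 (result.length : Int) 1).foldl beggarsProblemPrefStep result

def beggarsProblem (A : Int) (B : List (List Int)) : List Int :=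
  let result := List.replicate A.toNat (0 : Int)
  let result := (PySem.List.pyRange 0 (B.length : Int) 1).foldl
    (fun res i => beggarsProblemStep A res (PySem.List.pyGetD B i [])) result
  beggarsProblemPref result

-- ===== PORT B =====
-- body of B's loop: two slice-assignments, `result[l-1:] = [x+v ...]` and `result[r:] = [x-v ...]`
def beggarsProblemAltStep (A : Int) (res : List Int) (q : List Int) : List Int :=
  let v := PySem.List.pyGetD q 2 0
  let res := PySem.List.slice res none (some (PySem.List.pyGetD q 0 0 - 1)) ++
      (PySem.List.slice res (some (PySem.List.pyGetD q 0 0 - 1)) none).map (fun x => x + v)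
  if PySem.List.pyGetD q 1 0 < A then
    PySem.List.slice res none (some (PySem.List.pyGetD q 1 0)) ++
      (PySem.List.slice res (some (PySem.List.pyGetD q 1 0)) none).map (fun x => x - v)
  else res

def beggarsProblem_alt (A : Int) (B : List (List Int)) : List Int :=
  B.foldl (beggarsProblemAltStep A) (List.replicate A.toNat 0)

-- ===== PRECONDITION & SPEC =====
-- Pre_ is exactly the inputs on which the Python A returns normally: every query has at least
-- the three entries l, r, v, its start index l-1 is a valid (possibly negative) Python index
-- into the A-element list, and, when the branch r < A fires, r is a valid index too;
-- otherwise A raises IndexError.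
def Pre_beggarsProblem (A : Int) (B : List (List Int)) : Prop :=
  ∀ q ∈ B, 3 ≤ q.length ∧ -A ≤ q.getD 0 0 - 1 ∧ q.getD 0 0 - 1 < A ∧
    (q.getD 1 0 < A → -A ≤ q.getD 1 0)
instance (A : Int) (B : List (List Int)) : Decidable (Pre_beggarsProblem A B) := by
  unfold Pre_beggarsProblem; infer_instance

def pvWitness_beggarsProblem : Int × List (List Int) :=
  (5, [[1, 2, 10], [2, 3, 20], [2, 5, 25]])

def Spec_beggarsProblem (A : Int) (B : List (List Int)) (out : List Int) : Prop := out = beggarsProblem_alt A B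
instance (A : Int) (B : List (List Int)) (out : List Int) : Decidable (Spec_beggarsProblem A B out) := by unfold Spec_beggarsProblem; infer_instance

-- ===== CLAIM (what is proved, stated in full; the proofs are below) =====
def Claim_equal_beggarsProblem : Prop := ∀ (A : Int) (B : List (List Int)), Dom_beggarsProblem A B → Pre_beggarsProblem A B → Spec_beggarsProblem A B (beggarsProblem A B)

-- ===== LEMMAS AND PROOFS =====

-- Python negative-index normalization (proof-side only)
def posIdx (A : Int) (i : Int) : Int := if i < 0 then i + A else i

-- per-query contribution to the difference array at (Nat) position k
def dcontrib (A : Int) (q : List Int) (k : Nat) : Int :=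
  (if posIdx A (q.getD 0 0 - 1) = (k : Int) then q.getD 2 0 else 0) +
  (if q.getD 1 0 < A ∧ posIdx A (q.getD 1 0) = (k : Int) then -(q.getD 2 0) else 0)

-- per-query contribution to beggar j's final total (shared target of both programs)
def bcontrib (A : Int) (q : List Int) (j : Int) : Int :=
  q.getD 2 0 *
    ((if posIdx A (q.getD 0 0 - 1) ≤ j then (1 : Int) else 0) -
     (if q.getD 1 0 < A ∧ posIdx A (q.getD 1 0) ≤ j then (1 : Int) else 0))

theorem pyIdx_norm (n : Nat) (i : Int) (h1 : -(n : Int) ≤ i) (h2 : i < n) :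
    PySem.List.pyIdx? n i = some (posIdx n i).toNat := by
  unfold PySem.List.pyIdx? posIdx
  by_cases h0 : 0 ≤ i
  · rw [if_pos h0, if_pos h2, if_neg (by omega)]
  · rw [if_neg h0, if_pos h1, if_pos (by omega)]
    congr 1
    omega

theorem setD_norm (xs : List Int) (i v : Int) (h1 : -(xs.length : Int) ≤ i)
    (h2 : i < xs.length) :
    PySem.List.pySetD xs i v = xs.set (posIdx xs.length i).toNat v := by
  unfold PySem.List.pySetD PySem.List.pySet?
  rw [pyIdx_norm xs.length i h1 h2]
  rfl

theorem getD_norm (xs : List Int) (i : Int) (h1 : -(xs.length : Int) ≤ i)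
    (h2 : i < xs.length) :
    PySem.List.pyGetD xs i 0 = xs.getD (posIdx xs.length i).toNat 0 := by
  unfold PySem.List.pyGetD PySem.List.pyGet?
  rw [pyIdx_norm xs.length i h1 h2]
  rw [List.getD_eq_getElem?_getD]
  rfl

theorem set_getD (res : List Int) (a : Nat) (v : Int) (j : Nat) (ha : a < res.length) :
    (res.set a v).getD j 0 = if a = j then v else res.getD j 0 := by
  by_cases h : a = j
  · subst h
    rw [if_pos rfl, List.getD_eq_getElem?_getD, List.getElem?_set_self (by omega),
      Option.getD_some]
  · rw [if_neg h, List.getD_eq_getElem?_getD, List.getElem?_set_ne h,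
      ← List.getD_eq_getElem?_getD]

theorem posIdx_bounds (A i : Int) (h1 : -A ≤ i) (h2 : i < A) :
    0 ≤ posIdx A i ∧ posIdx A i < A := by
  unfold posIdx
  split_ifs <;> omega

theorem step_getD (A : Int) (res q : List Int) (j : Nat) (hj : j < res.length)
    (hl1 : -A ≤ q.getD 0 0 - 1) (hl2 : q.getD 0 0 - 1 < A)
    (hr2 : q.getD 1 0 < A → -A ≤ q.getD 1 0) (hA : (res.length : Int) = A) :
    (beggarsProblemStep A res q).getD j 0 = res.getD j 0 + dcontrib A q j := by
  have e0 : PySem.List.pyGetD q 0 0 = q.getD 0 0 := by simp [pysem]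
  have e1 : PySem.List.pyGetD q 1 0 = q.getD 1 0 := by simp [pysem]
  have e2 : PySem.List.pyGetD q 2 0 = q.getD 2 0 := by simp [pysem]
  unfold beggarsProblemStep dcontrib
  rw [e0, e1, e2, show q.getD 1 0 - 1 + 1 = q.getD 1 0 by ring]
  show (if q.getD 1 0 < A then
      PySem.List.pySetD
        (PySem.List.pySetD res (q.getD 0 0 - 1)
          (PySem.List.pyGetD res (q.getD 0 0 - 1) 0 + q.getD 2 0)) (q.getD 1 0)
        (PySem.List.pyGetD
          (PySem.List.pySetD res (q.getD 0 0 - 1)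
            (PySem.List.pyGetD res (q.getD 0 0 - 1) 0 + q.getD 2 0)) (q.getD 1 0) 0
          + -(q.getD 2 0))
    else
      PySem.List.pySetD res (q.getD 0 0 - 1)
        (PySem.List.pyGetD res (q.getD 0 0 - 1) 0 + q.getD 2 0)).getD j 0 = _
  have ht1 := posIdx_bounds A (q.getD 0 0 - 1) hl1 hl2
  rw [setD_norm res (q.getD 0 0 - 1) _ (by omega) (by omega),
      getD_norm res (q.getD 0 0 - 1) (by omega) (by omega), hA]
  set t1 : Int := posIdx A (q.getD 0 0 - 1) with hdef1
  set S2 : List Int := res.set t1.toNat (res.getD t1.toNat 0 + q.getD 2 0) with hS2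
  have hL : S2.length = res.length := by rw [hS2]; exact List.length_set ..
  by_cases hr : q.getD 1 0 < A
  · rw [if_pos hr]
    have ht2 := posIdx_bounds A (q.getD 1 0) (hr2 hr) hr
    rw [setD_norm S2 (q.getD 1 0) _ (by omega) (by omega),
        getD_norm S2 (q.getD 1 0) (by omega) (by omega), hL, hA]
    set t2 : Int := posIdx A (q.getD 1 0) with hdef2
    rw [set_getD _ _ _ j (by omega),
        set_getD _ _ _ t2.toNat (by omega),
        set_getD _ _ _ j (by omega)]
    by_cases h2 : t2 = (j : Int)
    · rw [if_pos (show t2.toNat = j by omega),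
        if_pos (show q.getD 1 0 < A ∧ t2 = (j : Int) from ⟨hr, h2⟩)]
      by_cases h1 : t1 = (j : Int)
      · rw [if_pos (show t1.toNat = t2.toNat by omega), if_pos h1,
          show t1.toNat = j by omega]
        ring
      · rw [if_neg (show ¬ t1.toNat = t2.toNat by omega), if_neg h1,
          show t2.toNat = j by omega]
        ring
    · rw [if_neg (show ¬ t2.toNat = j by omega),
        if_neg (show ¬ (q.getD 1 0 < A ∧ t2 = (j : Int)) from fun hh => h2 hh.2)]
      by_cases h1 : t1 = (j : Int)
      · rw [if_pos (show t1.toNat = j by omega), if_pos h1,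
          show t1.toNat = j by omega]
        ring
      · rw [if_neg (show ¬ t1.toNat = j by omega), if_neg h1]
        ring
  · rw [if_neg hr]
    rw [if_neg (show ¬ (q.getD 1 0 < A ∧ posIdx A (q.getD 1 0) = (j : Int)) from
      fun hh => hr hh.1)]
    rw [set_getD _ _ _ j (by omega)]
    by_cases h1 : t1 = (j : Int)
    · rw [if_pos (show t1.toNat = j by omega), if_pos h1,
        show t1.toNat = j by omega]
      ring
    · rw [if_neg (show ¬ t1.toNat = j by omega), if_neg h1]
      ring

theorem length_step (A : Int) (res q : List Int) :
    (beggarsProblemStep A res q).length = res.length := by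
  unfold beggarsProblemStep
  split_ifs <;> simp [PySem.List.length_pySetD]

theorem length_fold (A : Int) (L : List (List Int)) (res : List Int) :
    (L.foldl (beggarsProblemStep A) res).length = res.length := by
  induction L generalizing res with
  | nil => rfl
  | cons q L ih => simp [List.foldl, ih, length_step]

theorem fold_getD (A : Int) (L : List (List Int)) (res : List Int)
    (hq : ∀ q ∈ L, -A ≤ q.getD 0 0 - 1 ∧ q.getD 0 0 - 1 < A ∧
      (q.getD 1 0 < A → -A ≤ q.getD 1 0))
    (hA : (res.length : Int) = A) (j : Nat) (hj : j < res.length) :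
    (L.foldl (beggarsProblemStep A) res).getD j 0
      = res.getD j 0 + (L.map (fun q => dcontrib A q j)).sum := by
  induction L generalizing res with
  | nil => simp
  | cons q L ih =>
    have hq1 := hq q (by simp)
    have h1 := step_getD A res q j hj hq1.1 hq1.2.1 hq1.2.2 hA
    have hlen := length_step A res q
    simp only [List.foldl_cons, List.map_cons, List.sum_cons]
    rw [ih (beggarsProblemStep A res q) (fun p hp => hq p (by simp [hp]))
      (by rw [hlen]; exact hA) (by omega), h1]
    ring

theorem length_fold2 (L : List Int) (res : List Int) :
    (L.foldl beggarsProblemPrefStep res).length = res.length := by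
  induction L generalizing res with
  | nil => rfl
  | cons i L ih => simp [List.foldl, ih, beggarsProblemPrefStep, PySem.List.length_pySetD]

theorem pref_aux (t : Nat) (res : List Int) :
    t ≤ res.length → ∀ j : Nat, j < res.length →
    ((PySem.List.pyRange 1 (t : Int) 1).foldl beggarsProblemPrefStep res).getD j 0
      = if j < t then ∑ k ∈ Finset.range (j + 1), res.getD k 0 else res.getD j 0 := by
  induction t with
  | zero =>
    intro _ j hj
    rw [PySem.List.pyRange_one_eq_nil (by omega)]
    simp
  | succ t ih =>
    intro ht j hj
    by_cases ht0 : t = 0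
    · subst ht0
      rw [show ((1 : Nat) : Int) = 1 by norm_num, PySem.List.pyRange_one_eq_nil (by omega)]
      simp only [List.foldl_nil]
      by_cases hj0 : j = 0
      · subst hj0; simp
      · simp [show ¬ j < 1 by omega]
    · have h1t : (1 : Int) ≤ (t : Int) := by omega
      rw [show ((t + 1 : Nat) : Int) = (t : Int) + 1 by push_cast; ring,
        PySem.List.pyRange_one_succ_right h1t, List.foldl_append]
      simp only [List.foldl_cons, List.foldl_nil]
      set r := (PySem.List.pyRange 1 (t : Int) 1).foldl beggarsProblemPrefStep res with hr
      have hrlen : r.length = res.length := length_fold2 _ _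
      have ihf : ∀ j' : Nat, j' < res.length → r.getD j' 0 =
          if j' < t then ∑ k ∈ Finset.range (j' + 1), res.getD k 0 else res.getD j' 0 :=
        fun j' hj' => ih (by omega) j' hj'
      unfold beggarsProblemPrefStep
      rw [setD_norm r (t : Int) _ (by omega) (by omega),
        getD_norm r (t : Int) (by omega) (by omega),
        show posIdx (r.length : Int) (t : Int) = (t : Int) by unfold posIdx; split_ifs <;> omega,
        show ((t : Int)).toNat = t by omega,
        show ((t : Int) - 1) = ((t - 1 : Nat) : Int) by omega,
        PySem.List.pyGetD_natCast,
        set_getD _ _ _ j (by omega)]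
      have hv1 : r.getD t 0 = res.getD t 0 := by
        rw [ihf t (by omega)]; simp
      have hv2 : r.getD (t - 1) 0 = ∑ k ∈ Finset.range t, res.getD k 0 := by
        rw [ihf (t - 1) (by omega), if_pos (by omega),
          show t - 1 + 1 = t by omega]
      rw [hv1, hv2]
      by_cases hjt : t = j
      · subst hjt
        rw [if_pos rfl, if_pos (by omega), Finset.sum_range_succ]
        ring
      · rw [if_neg hjt, ihf j hj]
        split_ifs <;> first | rfl | omega

theorem pref_getD (res : List Int) (j : Nat) (hj : j < res.length) :
    (beggarsProblemPref res).getD j 0 = ∑ k ∈ Finset.range (j + 1), res.getD k 0 := by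
  unfold beggarsProblemPref
  rw [pref_aux res.length res (by omega) j hj, if_pos hj]

theorem length_pref (res : List Int) : (beggarsProblemPref res).length = res.length := by
  unfold beggarsProblemPref
  exact length_fold2 _ _

-- swap a Finset sum with a list-map sum
theorem sum_swap_list {α : Type} (L : List α) (s : Finset ℕ) (f : α → ℕ → Int) :
    ∑ k ∈ s, (L.map (fun q => f q k)).sum = (L.map (fun q => ∑ k ∈ s, f q k)).sum := by
  induction L with
  | nil => simp
  | cons q L ih => simp [Finset.sum_add_distrib, ih]

theorem sum_indicator (c v : Int) (m : Nat) :
    (∑ k ∈ Finset.range m, if c = (k : Int) then v else 0)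
      = if 0 ≤ c ∧ c < (m : Int) then v else 0 := by
  induction m with
  | zero => simp
  | succ m ih =>
    rw [Finset.sum_range_succ, ih]
    split_ifs <;> push_cast at * <;> omega

-- A's prefix-summed difference entries up to j collapse to the per-beggar contribution
theorem dcontrib_sum (A : Int) (q : List Int) (j : Nat)
    (hl1 : -A ≤ q.getD 0 0 - 1) (hl2 : q.getD 0 0 - 1 < A)
    (hr2 : q.getD 1 0 < A → -A ≤ q.getD 1 0) :
    ∑ k ∈ Finset.range (j + 1), dcontrib A q k = bcontrib A q (j : Int) := by
  have ht1 := posIdx_bounds A (q.getD 0 0 - 1) hl1 hl2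
  unfold dcontrib bcontrib
  set t1 : Int := posIdx A (q.getD 0 0 - 1) with hdef1
  set t2 : Int := posIdx A (q.getD 1 0) with hdef2
  clear_value t1 t2
  rw [Finset.sum_add_distrib, sum_indicator]
  by_cases hr : q.getD 1 0 < A
  · have ht2 := posIdx_bounds A (q.getD 1 0) (hr2 hr) hr
    simp only [hr, true_and]
    rw [sum_indicator]
    split_ifs <;> (first | ring1 | (exfalso; omega))
  · have hz : ∀ k ∈ Finset.range (j + 1),
        (if q.getD 1 0 < A ∧ t2 = (k : Int) then -(q.getD 2 0) else 0)
          = 0 := by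
      intro k _; exact if_neg (fun hh => hr hh.1)
    rw [Finset.sum_congr rfl hz, Finset.sum_const_zero]
    simp only [if_neg (show ¬ (q.getD 1 0 < A ∧ t2 ≤ (j : Int)) from
      fun hh => hr hh.1)]
    split_ifs <;> (first | ring1 | (exfalso; omega))

theorem fold_bridge (A : Int) (B : List (List Int)) (init : List Int) :
    (PySem.List.pyRange 0 (B.length : Int) 1).foldl
        (fun res i => beggarsProblemStep A res (PySem.List.pyGetD B i [])) init
      = B.foldl (beggarsProblemStep A) init :=
  PySem.List.foldl_pyRange_zero_pyGetD B [] (beggarsProblemStep A) init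

-- ===== B-side lemmas =====

theorem slice_none_some (xs : List Int) (i : Int) :
    PySem.List.slice xs none (some i) = xs.take (PySem.List.clampIdx xs.length i) := by
  simp [PySem.List.slice]

theorem clampIdx_le (n : Nat) (i : Int) : PySem.List.clampIdx n i ≤ n := by
  unfold PySem.List.clampIdx
  split_ifs <;> omega

theorem clampIdx_posIdx (n : Nat) (i : Int) (h1 : -(n : Int) ≤ i) (h2 : i < n) :
    (PySem.List.clampIdx n i : Int) = posIdx (n : Int) i := by
  unfold PySem.List.clampIdx posIdx
  split_ifs <;> omega

-- a slice-assignment `res[i:] = [f x for x in res[i:]]`, pointwise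
theorem sufUpd_getD (res : List Int) (i : Int) (f : Int → Int) (j : Nat)
    (hj : j < res.length) :
    (PySem.List.slice res none (some i) ++
      (PySem.List.slice res (some i) none).map f).getD j 0
      = if PySem.List.clampIdx res.length i ≤ j then f (res.getD j 0)
        else res.getD j 0 := by
  rw [slice_none_some, PySem.List.slice_some_none]
  set s := PySem.List.clampIdx res.length i with hs
  have hsle : s ≤ res.length := clampIdx_le _ _
  have hlt : (res.take s).length = s := by rw [List.length_take]; omega
  have hlenA : (res.take s ++ (res.drop s).map f).length = res.length := by
    simp only [List.length_append, List.length_map, List.length_drop]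
    omega
  by_cases h : s ≤ j
  · rw [if_pos h, List.getD_eq_getElem _ 0 (hlenA ▸ hj),
      List.getElem_append_right (by omega), List.getElem_map, List.getElem_drop,
      List.getD_eq_getElem _ 0 hj]
    congr 2
    omega
  · rw [if_neg h, List.getD_eq_getElem _ 0 (hlenA ▸ hj),
      List.getElem_append_left (by omega), List.getElem_take,
      List.getD_eq_getElem _ 0 hj]

theorem sufUpd_length (res : List Int) (i : Int) (f : Int → Int) :
    (PySem.List.slice res none (some i) ++
      (PySem.List.slice res (some i) none).map f).length = res.length := by
  rw [slice_none_some, PySem.List.slice_some_none]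
  have := clampIdx_le res.length i
  simp only [List.length_append, List.length_take, List.length_map, List.length_drop]
  omega

theorem alt_step_length (A : Int) (res q : List Int) :
    (beggarsProblemAltStep A res q).length = res.length := by
  unfold beggarsProblemAltStep
  split_ifs <;> simp only [sufUpd_length]

theorem alt_step_getD (A : Int) (res q : List Int) (j : Nat) (hj : j < res.length)
    (hl1 : -A ≤ q.getD 0 0 - 1) (hl2 : q.getD 0 0 - 1 < A)
    (hr2 : q.getD 1 0 < A → -A ≤ q.getD 1 0) (hA : (res.length : Int) = A) :
    (beggarsProblemAltStep A res q).getD j 0 = res.getD j 0 + bcontrib A q (j : Int) := by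
  have e0 : PySem.List.pyGetD q 0 0 = q.getD 0 0 := by simp [pysem]
  have e1 : PySem.List.pyGetD q 1 0 = q.getD 1 0 := by simp [pysem]
  have e2 : PySem.List.pyGetD q 2 0 = q.getD 2 0 := by simp [pysem]
  unfold beggarsProblemAltStep bcontrib
  rw [e0, e1, e2]
  set U1 := PySem.List.slice res none (some (q.getD 0 0 - 1)) ++
      (PySem.List.slice res (some (q.getD 0 0 - 1)) none).map (fun x => x + q.getD 2 0)
    with hU1
  have hU1len : U1.length = res.length := sufUpd_length _ _ _
  have hc1 : (PySem.List.clampIdx res.length (q.getD 0 0 - 1) : Int)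
      = posIdx A (q.getD 0 0 - 1) := by
    rw [clampIdx_posIdx res.length _ (by omega) (by omega), hA]
  have hU1j : U1.getD j 0 = res.getD j 0 +
      (if posIdx A (q.getD 0 0 - 1) ≤ (j : Int) then q.getD 2 0 else 0) := by
    rw [hU1, sufUpd_getD res _ _ j hj]
    by_cases h : PySem.List.clampIdx res.length (q.getD 0 0 - 1) ≤ j
    · rw [if_pos h, if_pos (show posIdx A (q.getD 0 0 - 1) ≤ (j : Int) by omega)]
    · rw [if_neg h, if_neg (show ¬ posIdx A (q.getD 0 0 - 1) ≤ (j : Int) by omega),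
        add_zero]
  by_cases hr : q.getD 1 0 < A
  · rw [if_pos hr]
    have hc2 : (PySem.List.clampIdx U1.length (q.getD 1 0) : Int)
        = posIdx A (q.getD 1 0) := by
      rw [hU1len, clampIdx_posIdx res.length _ (by omega) (by omega), hA]
    rw [sufUpd_getD U1 _ _ j (by omega), hU1j]
    by_cases h2 : posIdx A (q.getD 1 0) ≤ (j : Int)
    · rw [if_pos (show PySem.List.clampIdx U1.length (q.getD 1 0) ≤ j by omega),
        if_pos (show q.getD 1 0 < A ∧ posIdx A (q.getD 1 0) ≤ (j : Int) from ⟨hr, h2⟩)]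
      split_ifs <;> ring
    · rw [if_neg (show ¬ PySem.List.clampIdx U1.length (q.getD 1 0) ≤ j by omega),
        if_neg (show ¬ (q.getD 1 0 < A ∧ posIdx A (q.getD 1 0) ≤ (j : Int)) from
          fun hh => h2 hh.2)]
      split_ifs <;> ring
  · rw [if_neg hr, hU1j,
      if_neg (show ¬ (q.getD 1 0 < A ∧ posIdx A (q.getD 1 0) ≤ (j : Int)) from
        fun hh => hr hh.1)]
    split_ifs <;> ring

theorem alt_fold_getD (A : Int) (L : List (List Int)) (res : List Int)
    (hq : ∀ q ∈ L, -A ≤ q.getD 0 0 - 1 ∧ q.getD 0 0 - 1 < A ∧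
      (q.getD 1 0 < A → -A ≤ q.getD 1 0))
    (hA : (res.length : Int) = A) (j : Nat) (hj : j < res.length) :
    (L.foldl (beggarsProblemAltStep A) res).getD j 0
      = res.getD j 0 + (L.map (fun q => bcontrib A q (j : Int))).sum := by
  induction L generalizing res with
  | nil => simp
  | cons q L ih =>
    have hq1 := hq q (by simp)
    have h1 := alt_step_getD A res q j hj hq1.1 hq1.2.1 hq1.2.2 hA
    have hlen := alt_step_length A res q
    simp only [List.foldl_cons, List.map_cons, List.sum_cons]
    rw [ih (beggarsProblemAltStep A res q) (fun p hp => hq p (by simp [hp]))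
      (by rw [hlen]; exact hA) (by omega), h1]
    ring

theorem alt_fold_length (A : Int) (L : List (List Int)) (res : List Int) :
    (L.foldl (beggarsProblemAltStep A) res).length = res.length := by
  induction L generalizing res with
  | nil => rfl
  | cons q L ih => simp [List.foldl, ih, alt_step_length]

-- ===== VERDICT =====
theorem beggarsProblem_spec : Claim_equal_beggarsProblem := by
  intro A B _ hpre
  unfold Spec_beggarsProblem beggarsProblem beggarsProblem_alt
  show beggarsProblemPref ((PySem.List.pyRange 0 (B.length : Int) 1).foldl
      (fun res i => beggarsProblemStep A res (PySem.List.pyGetD B i []))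
      (List.replicate A.toNat 0)) = _
  rw [fold_bridge]
  have hlen1 : (B.foldl (beggarsProblemStep A) (List.replicate A.toNat 0)).length
      = A.toNat := by
    rw [length_fold]; exact List.length_replicate
  apply List.ext_getElem
  · rw [length_pref, hlen1, alt_fold_length, List.length_replicate]
  · intro i h1 h2
    have hiA : i < A.toNat := by rw [length_pref, hlen1] at h1; exact h1
    rw [← List.getD_eq_getElem _ 0 h1, ← List.getD_eq_getElem _ 0 h2]
    rw [pref_getD _ i (by rw [hlen1]; exact hiA)]
    rw [alt_fold_getD A B (List.replicate A.toNat 0)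
      (fun q hq => ⟨(hpre q hq).2.1, (hpre q hq).2.2.1, (hpre q hq).2.2.2⟩)
      (by rw [List.length_replicate]; omega) i
      (by rw [List.length_replicate]; exact hiA)]
    have hstep : ∀ k ∈ Finset.range (i + 1),
        (B.foldl (beggarsProblemStep A) (List.replicate A.toNat 0)).getD k 0
          = (B.map (fun q => dcontrib A q k)).sum := by
      intro k hk
      have hk' : k < (List.replicate A.toNat (0:Int)).length := by
        rw [List.length_replicate]
        have := Finset.mem_range.mp hk
        omega
      rw [fold_getD A B (List.replicate A.toNat 0)
        (fun q hq => ⟨(hpre q hq).2.1, (hpre q hq).2.2.1, (hpre q hq).2.2.2⟩)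
        (by rw [List.length_replicate]; omega) k hk']
      simp
    rw [Finset.sum_congr rfl hstep, sum_swap_list]
    have hrep : (List.replicate A.toNat (0 : Int)).getD i 0 = 0 := by
      simp only [List.getD_eq_getElem?_getD, List.getElem?_replicate]
      split <;> rfl
    rw [hrep, zero_add]
    congr 1
    apply List.map_congr_left
    intro q hq
    have hp := hpre q hq
    exact dcontrib_sum A q i hp.2.1 hp.2.2.1 hp.2.2.2
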